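-- pv_equiv track=rewrite | github.com/a104532/PL2025-A104532 | TPC2/parser.py | isCompleteRecord
-- ===== SOURCE A (Python) =====
-- def isCompleteRecord(linha, cabecalhos):
--     "Verifica se todos os campos estão na mesma linha"
--     dentro_aspas = False
--     contador_campos = 1
--
--     for char in linha:
--         if char == '"':
--             dentro_aspas = not dentro_aspas
--         elif char == ';' and not dentro_aspas:
--             contador_campos += 1
--
--     return contador_campos == len(cabecalhos)
-- ===== SOURCE B (Python) =====
-- def isCompleteRecord(linha, cabecalhos):
--     "Verifica se todos os campos estão na mesma linha"
--     partes = linha.split('"')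
--     fora = sum(seg.count(';') for i, seg in enumerate(partes) if i % 2 == 0)
--     return fora + 1 == len(cabecalhos)
-- ===== Notes on version B (the rewrite author's own statement) =====
-- stated objective: simpler
-- what changed: Replaces the character-by-character quote state machine with a partition strategy: split the line on '"' and count ';' only in even-indexed segments (the text outside quotes).
import Mathlib
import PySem

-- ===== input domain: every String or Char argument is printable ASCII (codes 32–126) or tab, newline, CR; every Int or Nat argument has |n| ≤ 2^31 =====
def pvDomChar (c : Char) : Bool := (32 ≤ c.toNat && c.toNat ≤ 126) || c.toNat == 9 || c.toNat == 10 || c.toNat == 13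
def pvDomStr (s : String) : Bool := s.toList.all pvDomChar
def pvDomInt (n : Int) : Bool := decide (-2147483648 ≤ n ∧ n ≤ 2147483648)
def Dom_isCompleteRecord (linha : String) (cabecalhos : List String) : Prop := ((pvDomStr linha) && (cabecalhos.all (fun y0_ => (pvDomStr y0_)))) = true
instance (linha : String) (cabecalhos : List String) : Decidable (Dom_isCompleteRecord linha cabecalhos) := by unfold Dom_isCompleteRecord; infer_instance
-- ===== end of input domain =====

-- B replaces A's character-by-character quote state machine by splitting the line on '"'
-- and counting ';' only in the even-indexed (outside-quotes) segments: simpler, same cost.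

-- ===== PORT A =====
def isCompleteRecord (linha : String) (cabecalhos : List String) : Bool :=
  -- state (dentro_aspas, contador_campos), scanned character by character
  let st := linha.toList.foldl
    (fun (st : Bool × Int) c =>
      if c == '"' then (!st.1, st.2)
      else if c == ';' && !st.1 then (st.1, st.2 + 1)
      else st)
    (false, 1)
  st.2 == (cabecalhos.length : Int)

-- ===== PORT B =====
def isCompleteRecord_alt (linha : String) (cabecalhos : List String) : Bool :=
  -- partes = linha.split('"')  — sep is the nonempty '"', so split? always returns some
  match PySem.Str.split? linha "\"" with
  | none => false
  | some partes =>
    -- fora = sum(seg.count(';') for i, seg in enumerate(partes) if i % 2 == 0)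
    let fora : Int := (PySem.List.enumerate partes).foldl
      (fun acc p => if PySem.Int.mod p.1 2 == 0 then acc + (PySem.Str.count p.2 ";" : Int) else acc) 0
    fora + 1 == (cabecalhos.length : Int)

-- ===== PRECONDITION & SPEC =====
def Spec_isCompleteRecord (linha : String) (cabecalhos : List String) (out : Bool) : Prop := out = isCompleteRecord_alt linha cabecalhos
instance (linha : String) (cabecalhos : List String) (out : Bool) : Decidable (Spec_isCompleteRecord linha cabecalhos out) := by unfold Spec_isCompleteRecord; infer_instance

-- ===== CLAIM (what is proved, stated in full; the proofs are below) =====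
def Claim_equal_isCompleteRecord : Prop := ∀ (linha : String) (cabecalhos : List String), Dom_isCompleteRecord linha cabecalhos → Spec_isCompleteRecord linha cabecalhos (isCompleteRecord linha cabecalhos)

-- ===== LEMMAS AND PROOFS =====

-- clean split on '"': (head segment, remaining segments)
def csp : List Char → List Char × List (List Char)
  | [] => ([], [])
  | c :: t =>
    let p := csp t
    if c = '"' then ([], p.1 :: p.2) else (c :: p.1, p.2)

-- semicolons in even-parity segments (b = current segment is even-indexed)
def altCnt : Bool → List (List Char) → Int
  | _, [] => 0
  | b, s :: r => (if b then (s.count ';' : Int) else 0) + altCnt (!b) r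

theorem count_go_eq (l : List Char) : ∀ (fuel : Nat) (acc : Nat), l.length ≤ fuel →
    PySem.Chars.count.go [';'] fuel l acc = acc + l.count ';' := by
  induction l with
  | nil => intro fuel acc h; cases fuel <;> simp [PySem.Chars.count.go]
  | cons c t ih =>
    intro fuel acc h
    cases fuel with
    | zero => simp at h
    | succ f =>
      by_cases hc : c = ';'
      · subst hc
        simp only [PySem.Chars.count.go]
        rw [if_pos (by simp), show List.drop [';'].length (';' :: t) = t from rfl,
            ih f (acc + 1) (by simpa using h)]
        simp; omega
      · simp only [PySem.Chars.count.go]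
        rw [if_neg (by simp [List.isPrefixOf]; exact fun h' => hc h'.symm),
            ih f acc (by simpa using h)]
        simp [hc]

theorem chars_count_semi (l : List Char) : PySem.Chars.count l [';'] = l.count ';' := by
  simp only [PySem.Chars.count, List.isEmpty]
  rw [if_neg (by simp), count_go_eq l l.length 0 le_rfl]
  omega

theorem splitOn_go_eq (l : List Char) : ∀ (fuel : Nat) (cur : List Char) (acc : List (List Char)),
    l.length ≤ fuel →
    PySem.Chars.splitOn.go ['"'] fuel l cur acc
      = acc.reverse ++ (cur.reverse ++ (csp l).1) :: (csp l).2 := by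
  induction l with
  | nil => intro fuel cur acc h; cases fuel <;> simp [PySem.Chars.splitOn.go, csp]
  | cons c t ih =>
    intro fuel cur acc h
    cases fuel with
    | zero => simp at h
    | succ f =>
      by_cases hc : c = '"'
      · subst hc
        simp only [PySem.Chars.splitOn.go]
        rw [if_pos (by simp), show List.drop ['"'].length ('"' :: t) = t from rfl,
            ih f [] ((cur.reverse) :: acc) (by simpa using h)]
        simp [csp]
      · simp only [PySem.Chars.splitOn.go]
        rw [if_neg (by simp [List.isPrefixOf]; exact fun h' => hc h'.symm),
            ih f (c :: cur) acc (by simpa using h)]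
        simp [csp, hc]

theorem split_quote_eq (cs : List Char) :
    PySem.Chars.split? cs ['"'] = some ((csp cs).1 :: (csp cs).2) := by
  simp only [PySem.Chars.split?, List.isEmpty]
  rw [if_neg (by simp)]
  simp only [PySem.Chars.splitOn]
  rw [splitOn_go_eq cs (cs.length + 1) [] [] (by omega)]
  simp

theorem fmod_two_succ (k : Int) : ((k + 1).fmod 2 == 0) = (!(k.fmod 2 == 0)) := by
  rcases Int.emod_two_eq k with h | h <;>
    simp [Int.fmod_eq_emod, Int.add_emod, h]

theorem enum_fold (parts : List (List Char)) : ∀ (k acc : Int),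
    (PySem.List.enumerate (parts.map String.ofList) k).foldl
      (fun acc p => if PySem.Int.mod p.1 2 == 0 then acc + (PySem.Str.count p.2 ";" : Int) else acc) acc
      = acc + altCnt (k.fmod 2 == 0) parts := by
  induction parts with
  | nil => intro k acc; simp [altCnt]
  | cons s r ih =>
    intro k acc
    simp only [PySem.Int.mod] at ih ⊢
    simp only [List.map, PySem.List.enumerate, List.foldl]
    rw [ih (k + 1), fmod_two_succ, altCnt]
    by_cases hk : k.fmod 2 == 0 <;> simp [hk]
    rw [chars_count_semi]
    ring

theorem fold_machine (cs : List Char) : ∀ (b : Bool) (n : Int),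
    (cs.foldl (fun (st : Bool × Int) c =>
      if c == '"' then (!st.1, st.2)
      else if c == ';' && !st.1 then (st.1, st.2 + 1)
      else st) (b, n)).2
      = n + altCnt (!b) ((csp cs).1 :: (csp cs).2) := by
  induction cs with
  | nil => intro b n; cases b <;> simp [csp, altCnt]
  | cons c t ih =>
    intro b n
    by_cases hq : c = '"'
    · subst hq
      simp only [List.foldl, if_pos (by rfl : ('"' == '"') = true)]
      rw [ih (!b) n]
      simp [csp, altCnt]
    · rcases Bool.eq_false_or_eq_true b with hb | hb
      · subst hb
        simp only [List.foldl]
        rw [if_neg (by simp [hq]), show (c == ';' && !true) = false by simp, if_neg (by simp)]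
        rw [ih true n]
        simp [csp, altCnt, hq]
      · subst hb
        by_cases hc : c = ';'
        · subst hc
          simp only [List.foldl]
          rw [if_neg (by decide), if_pos (by decide)]
          rw [ih false (n + 1)]
          simp [csp, altCnt]
          ring
        · simp only [List.foldl]
          rw [if_neg (by simp [hq]), if_neg (by simp [hc])]
          rw [ih false n]
          simp [csp, altCnt, hq, hc]

-- ===== VERDICT (by name: the statement is the Claim_ definition above) =====
theorem isCompleteRecord_spec : Claim_equal_isCompleteRecord := by
  unfold Claim_equal_isCompleteRecord Spec_isCompleteRecord
  intro linha cabecalhos _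
  unfold isCompleteRecord isCompleteRecord_alt
  have hsplit : PySem.Str.split? linha "\"" =
      some (((csp linha.toList).1 :: (csp linha.toList).2).map String.ofList) := by
    simp only [PySem.Str.split?]
    rw [show ("\"" : String).toList = ['"'] from rfl, split_quote_eq]
    rfl
  simp only [hsplit]
  have hb := enum_fold ((csp linha.toList).1 :: (csp linha.toList).2) 0 0
  simp only [fold_machine linha.toList, hb]
  have hf : (Int.fmod 0 2 == 0) = true := by decide
  simp only [hf, Bool.not_false]
  have h1 : ∀ X : Int, 1 + X = 0 + X + 1 := fun X => by ring
  rw [h1]
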